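-- pv_equiv track=rewrite | github.com/srydell/dotfiles | vim/.config/nvim/tools/leetcode_fetch.py | _leetcode_type_to_cpp
-- ===== SOURCE A (Python) =====
-- def _leetcode_type_to_cpp(le_type):
--     """Translate LeetCode metadata types into C++ types used by templates."""
--     if not le_type:
--         return "auto"
--
--     le_type = le_type.strip()
--     scalar_types = {
--         "boolean": "bool",
--         "character": "char",
--         "integer": "int",
--         "long": "long long",
--         "double": "double",
--         "string": "string",
--         "void": "void",
--         "ListNode": "ListNode*",
--         "TreeNode": "TreeNode*",
--         "Node": "Node*",
--     }
--     if le_type in scalar_types: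
--         return scalar_types[le_type]
--     if le_type.startswith("list<") and le_type.endswith(">"):
--         return f"vector<{_leetcode_type_to_cpp(le_type[5:-1])}>"
--     if le_type.endswith("[]"):
--         return f"vector<{_leetcode_type_to_cpp(le_type[:-2])}>"
--     return le_type
-- ===== SOURCE B (Python) =====
-- _SCALARS = {
--     "boolean": "bool",
--     "character": "char",
--     "integer": "int",
--     "long": "long long",
--     "double": "double",
--     "string": "string",
--     "void": "void",
--     "ListNode": "ListNode*",
--     "TreeNode": "TreeNode*",
--     "Node": "Node*",
-- }
--
--
-- def _unwrap(t):
--     """Return the element type of one wrapper layer, or None if t is not a wrapper."""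
--     if t.startswith("list<") and t.endswith(">"):
--         return t[5:-1]
--     if t.endswith("[]"):
--         return t[:-2]
--     return None
--
--
-- def _leetcode_type_to_cpp(le_type):
--     """Translate LeetCode metadata types into C++ types used by templates."""
--     prefix, suffix, s = "", "", le_type
--     while s:
--         s = s.strip()
--         if s in _SCALARS:
--             return prefix + _SCALARS[s] + suffix
--         inner = _unwrap(s)
--         if inner is None:
--             return prefix + s + suffix
--         prefix, suffix, s = prefix + "vector<", suffix + ">", inner
--     return prefix + "auto" + suffix
-- ===== Notes on version B (the rewrite author's own statement) =====
-- stated objective: alternative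
-- what changed: Replaces A's self-recursion over nested wrapper layers by a guard-while loop with prefix/suffix string accumulators and a separate _unwrap helper that peels one layer, returning early with the assembled string.
import Mathlib
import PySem

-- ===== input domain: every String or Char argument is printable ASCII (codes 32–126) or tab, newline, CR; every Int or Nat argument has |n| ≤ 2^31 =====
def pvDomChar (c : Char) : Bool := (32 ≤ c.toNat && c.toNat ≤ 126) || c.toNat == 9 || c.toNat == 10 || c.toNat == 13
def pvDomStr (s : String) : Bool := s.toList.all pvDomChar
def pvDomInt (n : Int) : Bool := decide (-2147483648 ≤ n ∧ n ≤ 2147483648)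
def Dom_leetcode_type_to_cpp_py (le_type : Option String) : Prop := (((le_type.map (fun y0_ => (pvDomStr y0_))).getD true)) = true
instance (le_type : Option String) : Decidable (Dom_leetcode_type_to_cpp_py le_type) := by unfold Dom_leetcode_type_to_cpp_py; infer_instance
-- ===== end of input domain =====

-- B replaces A's self-recursion over nested wrapper layers by a guard-while loop with
-- prefix/suffix accumulators and a separate one-layer unwrap helper (alternative
-- decomposition; same asymptotic cost).

-- ===== PORT A =====

-- the scalar_types dict literal of A
def pvScalarTypes : PySem.Dict String String := PySem.Dict.ofList
  [("boolean", "bool"), ("character", "char"), ("integer", "int"),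
   ("long", "long long"), ("double", "double"), ("string", "string"),
   ("void", "void"), ("ListNode", "ListNode*"), ("TreeNode", "TreeNode*"),
   ("Node", "Node*")]

-- strip never lengthens (termination of both ports)
theorem pvStrip_len_le (s : String) :
    (PySem.Str.strip s).toList.length ≤ s.toList.length := by
  rw [PySem.Str.toList_strip]
  unfold PySem.Chars.strip PySem.Chars.lstrip PySem.Chars.rstrip
  calc (List.dropWhile PySem.Chars.isspace (List.dropWhile PySem.Chars.isspace s.toList).reverse).reverse.length
      = (List.dropWhile PySem.Chars.isspace (List.dropWhile PySem.Chars.isspace s.toList).reverse).length := List.length_reverse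
    _ ≤ (List.dropWhile PySem.Chars.isspace s.toList).reverse.length := List.length_dropWhile_le _ _
    _ = (List.dropWhile PySem.Chars.isspace s.toList).length := List.length_reverse
    _ ≤ s.toList.length := List.length_dropWhile_le _ _

theorem pv_startswith_ne (t : String) (h : PySem.Str.startswith t "list<" = true) :
    t.toList.length ≠ 0 := by
  rw [PySem.Str.startswith_eq, PySem.Chars.startswith_iff] at h
  have h2 := h.length_le
  have : ("list<".toList).length = 5 := by decide
  omega

theorem pv_endswith_ne (t : String) (h : PySem.Str.endswith t "[]" = true) :
    t.toList.length ≠ 0 := by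
  rw [PySem.Str.endswith_eq, PySem.Chars.endswith_iff] at h
  have h2 := h.length_le
  have : ("[]".toList).length = 2 := by decide
  omega

-- the two slices of the stripped string strictly shorten (termination of both ports)
theorem pvSlice_inner_lt (s : String) (h : PySem.Str.startswith (PySem.Str.strip s) "list<" = true) :
    (PySem.Str.slice (PySem.Str.strip s) (some 5) (some (-1))).toList.length < s.toList.length := by
  set t := PySem.Str.strip s with ht
  have hne := pv_startswith_ne t h
  have hl := pvStrip_len_le s
  have h2 := PySem.Str.toList_slice t (some 5) (some (-1))
  simp only [PySem.Chars.slice_eq_listSlice] at h2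
  rw [h2, PySem.List.length_slice, PySem.List.clampIdx_neg_one]
  rw [← ht] at hl
  omega

theorem pvSlice_arr_lt (s : String) (h : PySem.Str.endswith (PySem.Str.strip s) "[]" = true) :
    (PySem.Str.slice (PySem.Str.strip s) none (some (-2))).toList.length < s.toList.length := by
  set t := PySem.Str.strip s with ht
  have hne := pv_endswith_ne t h
  have hl := pvStrip_len_le s
  have h2 := PySem.Str.toList_slice t none (some (-2))
  simp only [PySem.Chars.slice_eq_listSlice] at h2
  rw [h2, PySem.List.slice_to_neg_ofNat t.toList 2 (by omega)]
  simp only [List.length_take]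
  rw [← ht] at hl
  omega

def leetcode_type_to_cpp_py (le_type : Option String) : String :=
  match le_type with
  | none => "auto"                      -- `if not le_type: return "auto"` (None case)
  | some s =>
    if s = "" then "auto"               -- `if not le_type: return "auto"` (empty string)
    else
      let t := PySem.Str.strip s
      match pvScalarTypes.get? t with
      | some v => v
      | none =>
        if h1 : PySem.Str.startswith t "list<" && PySem.Str.endswith t ">" then
          "vector<" ++ leetcode_type_to_cpp_py (some (PySem.Str.slice t (some 5) (some (-1)))) ++ ">"
        else if h2 : PySem.Str.endswith t "[]" then
          "vector<" ++ leetcode_type_to_cpp_py (some (PySem.Str.slice t none (some (-2)))) ++ ">"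
        else t
termination_by (le_type.getD "").toList.length
decreasing_by
  · simp only [Option.getD_some]
    rw [Bool.and_eq_true] at h1
    exact pvSlice_inner_lt s h1.1
  · simp only [Option.getD_some]
    exact pvSlice_arr_lt s h2

-- ===== PORT B =====

-- B's module-level _SCALARS dict
def pvScalars : PySem.Dict String String := PySem.Dict.ofList
  [("boolean", "bool"), ("character", "char"), ("integer", "int"),
   ("long", "long long"), ("double", "double"), ("string", "string"),
   ("void", "void"), ("ListNode", "ListNode*"), ("TreeNode", "TreeNode*"),
   ("Node", "Node*")]

-- _unwrap: element type of one wrapper layer, None if not a wrapper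
def pvUnwrap (t : String) : Option String :=
  if PySem.Str.startswith t "list<" && PySem.Str.endswith t ">" then
    some (PySem.Str.slice t (some 5) (some (-1)))
  else if PySem.Str.endswith t "[]" then
    some (PySem.Str.slice t none (some (-2)))
  else none

-- one unwrap step (after strip) strictly shortens (termination of B's loop)
theorem pvUnwrap_lt (s inner : String)
    (h : pvUnwrap (PySem.Str.strip s) = some inner) :
    inner.toList.length < s.toList.length := by
  unfold pvUnwrap at h
  split_ifs at h with h1 h2
  · rw [← Option.some.inj h]
    rw [Bool.and_eq_true] at h1
    exact pvSlice_inner_lt s h1.1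
  · rw [← Option.some.inj h]
    exact pvSlice_arr_lt s h2

-- the `while s:` loop of B, with the prefix/suffix accumulators
def pvPeel (s : Option String) (pre suf : String) : String :=
  match s with
  | none => pre ++ "auto" ++ suf            -- falsy s: exit the loop
  | some s0 =>
    if s0 = "" then pre ++ "auto" ++ suf    -- falsy s: exit the loop
    else
      let t := PySem.Str.strip s0
      match pvScalars.get? t with
      | some v => pre ++ v ++ suf
      | none =>
        match h : pvUnwrap t with
        | none => pre ++ t ++ suf
        | some inner => pvPeel (some inner) (pre ++ "vector<") (suf ++ ">")
termination_by (s.getD "").toList.length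
decreasing_by
  simp only [Option.getD_some]
  exact pvUnwrap_lt s0 inner h

def leetcode_type_to_cpp_py_alt (le_type : Option String) : String :=
  pvPeel le_type "" ""

-- ===== PRECONDITION & SPEC =====
def Spec_leetcode_type_to_cpp_py (le_type : Option String) (out : String) : Prop := out = leetcode_type_to_cpp_py_alt le_type
instance (le_type : Option String) (out : String) : Decidable (Spec_leetcode_type_to_cpp_py le_type out) := by unfold Spec_leetcode_type_to_cpp_py; infer_instance

-- ===== CLAIM (what is proved, stated in full; the proofs are below) =====
def Claim_equal_leetcode_type_to_cpp_py : Prop := ∀ (le_type : Option String), Dom_leetcode_type_to_cpp_py le_type → Spec_leetcode_type_to_cpp_py le_type (leetcode_type_to_cpp_py le_type)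

-- ===== LEMMAS AND PROOFS =====

theorem pvDicts_eq : pvScalars = pvScalarTypes := rfl

-- appending one more '>' to an all-'>' suffix commutes
theorem pvGt_comm (suf : String) (h : ∀ c ∈ suf.toList, c = '>') :
    suf ++ ">" = ">" ++ suf := by
  have hl : suf.toList = List.replicate suf.toList.length '>' :=
    List.eq_replicate_of_mem h
  apply String.toList_inj.mp
  simp only [String.toList_append]
  rw [hl, show (">" : String).toList = ['>'] from rfl, ← List.replicate_succ']
  simp [List.replicate_succ]

-- loop invariant: B's loop with accumulators computes pre ++ A's recursion ++ suf
theorem pvPeel_invariant (n : Nat) :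
    ∀ (s pre suf : String), s.toList.length ≤ n → (∀ c ∈ suf.toList, c = '>') →
      pvPeel (some s) pre suf = pre ++ leetcode_type_to_cpp_py (some s) ++ suf := by
  induction n with
  | zero =>
    intro s pre suf hlen _
    have h0 : s = "" := by
      have h0 : s.toList = [] := List.length_eq_zero_iff.mp (Nat.le_zero.mp hlen)
      have := congrArg String.ofList h0
      simpa using this
    subst h0
    rw [pvPeel, leetcode_type_to_cpp_py]
    simp
  | succ n ih =>
    intro s pre suf hlen hsuf
    have hsuf' : ∀ c ∈ (suf ++ ">").toList, c = '>' := by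
      simp only [String.toList_append]
      intro c hc
      rcases List.mem_append.mp hc with hc | hc
      · exact hsuf c hc
      · simpa using hc
    by_cases hne : s = ""
    · subst hne
      rw [pvPeel, leetcode_type_to_cpp_py]
      simp
    · rw [pvPeel, leetcode_type_to_cpp_py]
      simp only [if_neg hne, pvDicts_eq]
      cases hg : pvScalarTypes.get? (PySem.Str.strip s) with
      | some v => simp only [hg]
      | none =>
        simp only [hg]
        by_cases h1 : (PySem.Str.startswith (PySem.Str.strip s) "list<" && PySem.Str.endswith (PySem.Str.strip s) ">") = true
        · have hu : pvUnwrap (PySem.Str.strip s)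
              = some (PySem.Str.slice (PySem.Str.strip s) (some 5) (some (-1))) := by
            unfold pvUnwrap; rw [if_pos h1]
          have hlt := pvSlice_inner_lt s (Bool.and_eq_true _ _ |>.mp h1).1
          simp only [dif_pos h1]
          split
          · rename_i heq
            rw [hu] at heq
            exact absurd heq (by simp)
          · rename_i inner heq
            rw [hu] at heq
            have hinner := Option.some.inj heq
            subst hinner
            rw [ih _ _ _ (by omega) hsuf']
            simp only [String.append_assoc, pvGt_comm suf hsuf]
        · have h2cases : PySem.Str.endswith (PySem.Str.strip s) "[]" = true
              ∨ pvUnwrap (PySem.Str.strip s) = none := by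
            by_cases h2 : PySem.Str.endswith (PySem.Str.strip s) "[]" = true
            · exact Or.inl h2
            · refine Or.inr ?_
              unfold pvUnwrap
              rw [if_neg h1, if_neg h2]
          simp only [dif_neg h1]
          cases h2cases with
          | inl h2 =>
            have hu : pvUnwrap (PySem.Str.strip s)
                = some (PySem.Str.slice (PySem.Str.strip s) none (some (-2))) := by
              unfold pvUnwrap; rw [if_neg h1, if_pos h2]
            have hlt := pvSlice_arr_lt s h2
            simp only [dif_pos h2]
            split
            · rename_i heq
              rw [hu] at heq
              exact absurd heq (by simp)
            · rename_i inner heq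
              rw [hu] at heq
              have hinner := Option.some.inj heq
              subst hinner
              rw [ih _ _ _ (by omega) hsuf']
              simp only [String.append_assoc, pvGt_comm suf hsuf]
          | inr hu =>
            have h2 : ¬ PySem.Str.endswith (PySem.Str.strip s) "[]" = true := by
              intro h2
              unfold pvUnwrap at hu
              rw [if_neg h1, if_pos h2] at hu
              exact absurd hu (by simp)
            simp only [dif_neg h2]
            split
            · rfl
            · rename_i inner heq
              rw [hu] at heq
              exact absurd heq (by simp)

-- ===== VERDICT (by name: the statement is the Claim_ definition above) =====
theorem leetcode_type_to_cpp_py_spec : Claim_equal_leetcode_type_to_cpp_py := by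
  intro le_type _
  unfold Spec_leetcode_type_to_cpp_py leetcode_type_to_cpp_py_alt
  match le_type with
  | none => rw [pvPeel, leetcode_type_to_cpp_py]; simp
  | some s =>
    have h := pvPeel_invariant s.toList.length s "" "" (le_refl _) (by simp)
    rw [h]
    simp
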